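-- pv_equiv track=rewrite | github.com/nbeguier/Guy-De-Cointet | scripts/get_phrase.py | find_matching_sequences
-- ===== SOURCE A (Python) =====
-- def find_matching_sequences(words: list[str], pattern: list[int]) -> list[str]:
--     matches = []
--     n = len(pattern)
--
--     for i in range(len(words) - n + 1):
--         window = words[i:i + n]
--         if all(len(word) == expected_len for word, expected_len in zip(window, pattern)):
--             matches.append(" ".join(window))
--
--     return matches
-- ===== SOURCE B (Python) =====
-- def find_matching_sequences(words: list[str], pattern: list[int]) -> list[str]:
--     n = len(pattern)
--     m = len(words)
--     # inverted index: word length -> positions where it occurs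
--     positions = {}
--     for i, w in enumerate(words):
--         positions.setdefault(len(w), []).append(i)
--     # vote counting: each pattern position j casts a vote for every start s = i - j
--     votes = [0] * (m - n + 1)
--     for j, p in enumerate(pattern):
--         for i in positions.get(p, ()):
--             s = i - j
--             if 0 <= s <= m - n:
--                 votes[s] += 1
--     return [" ".join(words[s:s + n]) for s, v in enumerate(votes) if v == n]
-- ===== Notes on version B (the rewrite author's own statement) =====
-- stated objective: alternative
-- what changed: B replaces A's sliding-window per-window length checks by an inverted index (word length -> positions) plus vote counting: each pattern position votes for the window starts it supports, and starts with a full vote count are emitted.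
import Mathlib
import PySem

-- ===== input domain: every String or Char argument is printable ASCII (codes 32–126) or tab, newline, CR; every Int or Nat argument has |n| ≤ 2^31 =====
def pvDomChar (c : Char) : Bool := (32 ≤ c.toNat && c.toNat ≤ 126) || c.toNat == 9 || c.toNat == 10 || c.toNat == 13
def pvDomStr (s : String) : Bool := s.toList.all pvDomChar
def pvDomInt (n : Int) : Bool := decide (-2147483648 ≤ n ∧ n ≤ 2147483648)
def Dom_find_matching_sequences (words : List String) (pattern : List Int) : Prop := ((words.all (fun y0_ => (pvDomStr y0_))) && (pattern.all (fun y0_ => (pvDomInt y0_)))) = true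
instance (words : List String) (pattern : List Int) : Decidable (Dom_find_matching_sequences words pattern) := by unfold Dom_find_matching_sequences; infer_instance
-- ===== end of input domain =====

-- B replaces A's per-window sliding checks by an inverted index (word length -> positions)
-- with vote counting per window start (objective: alternative).

-- ===== PORT A =====
def find_matching_sequences (words : List String) (pattern : List Int) : List String :=
  let n := PySem.List.len pattern
  (PySem.List.pyRange 0 (PySem.List.len words - n + 1) 1).foldl
    (fun acc i =>
      let window := PySem.List.slice words (some i) (some (i + n))
      if (window.zip pattern).all (fun we => PySem.Str.len we.1 == we.2)
      then acc ++ [PySem.Str.join " " window] else acc) []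

-- ===== PORT B =====
def find_matching_sequences_alt (words : List String) (pattern : List Int) : List String :=
  let n := PySem.List.len pattern
  let m := PySem.List.len words
  let positions := (PySem.List.enumerate words 0).foldl
    (fun d q => d.modify (PySem.Str.len q.2) [] (· ++ [q.1])) PySem.Dict.empty
  let votes0 := List.replicate (m - n + 1).toNat (0 : Int)   -- [0] * (m - n + 1)
  let votes := (PySem.List.enumerate pattern 0).foldl
    (fun votes jp =>
      (positions.getD jp.2 []).foldl
        (fun votes i =>
          let s := i - jp.1
          if 0 ≤ s ∧ s ≤ m - n
          then PySem.List.pySetD votes s (PySem.List.pyGetD votes s 0 + 1)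
          else votes) votes) votes0
  ((PySem.List.enumerate votes 0).filter (fun sv => sv.2 == n)).map
    (fun sv => PySem.Str.join " " (PySem.List.slice words (some sv.1) (some (sv.1 + n))))

-- ===== PRECONDITION & SPEC =====
def Spec_find_matching_sequences (words : List String) (pattern : List Int) (out : List String) : Prop := out = find_matching_sequences_alt words pattern
instance (words : List String) (pattern : List Int) (out : List String) : Decidable (Spec_find_matching_sequences words pattern out) := by unfold Spec_find_matching_sequences; infer_instance

-- ===== CLAIM (what is proved, stated in full; the proofs are below) =====
def Claim_equal_find_matching_sequences : Prop := ∀ (words : List String) (pattern : List Int), Dom_find_matching_sequences words pattern → Spec_find_matching_sequences words pattern (find_matching_sequences words pattern)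

-- ===== LEMMAS AND PROOFS =====

-- the windowed output both sides reduce to
def pvWin (words : List String) (pattern : List Int) (i : Nat) : List String :=
  if (((words.drop i).take pattern.length).map PySem.Str.len) == pattern
  then [PySem.Str.join " " ((words.drop i).take pattern.length)] else []

-- the index list B's dict stores under length p
def pvOcc (words : List String) (p : Int) : List Int :=
  ((PySem.List.enumerate words 0).filter (fun q => PySem.Str.len q.2 == p)).map (·.1)

-- one vote cast by pattern position j at text position i
def pvStep (M j : Int) (v : List Int) (i : Int) : List Int :=
  if 0 ≤ i - j ∧ i - j ≤ M then PySem.List.pySetD v (i - j) (PySem.List.pyGetD v (i - j) 0 + 1) else v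

def pvM (words : List String) (pattern : List Int) : Int :=
  (words.length : Int) - (pattern.length : Int)

def pvVotes (words : List String) (pattern : List Int) : List Int :=
  (PySem.List.enumerate pattern 0).foldl
    (fun votes jp => (pvOcc words jp.2).foldl (pvStep (pvM words pattern) jp.1) votes)
    (List.replicate ((pvM words pattern) + 1).toNat 0)

def pvCnt (words : List String) (pattern : List Int) (s : Nat) : Nat :=
  (PySem.List.enumerate pattern 0).countP (fun jp => decide (((s : Int) + jp.1) ∈ pvOcc words jp.2))

lemma zip_all_len (ws : List String) (ps : List Int) (h : ws.length = ps.length) :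
    ((ws.zip ps).all (fun we => PySem.Str.len we.1 == we.2)) = (ws.map PySem.Str.len == ps) := by
  induction ws generalizing ps with
  | nil => cases ps with
    | nil => simp
    | cons p pt => simp at h
  | cons w wt ih => cases ps with
    | nil => simp at h
    | cons p pt =>
      simp only [List.zip_cons_cons, List.all_cons, List.map_cons, List.cons_beq_cons]
      rw [ih pt (by simpa using h)]

lemma filter_map_eq_flatMap {α β : Type} (l : List α) (p : α → Bool) (f : α → β) :
    (l.filter p).map f = l.flatMap (fun x => if p x then [f x] else []) := by
  induction l with
  | nil => rfl
  | cons a t ih =>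
    by_cases h : p a = true <;> simp [List.flatMap_cons, h, ih]

lemma a_char (words : List String) (pattern : List Int) :
    find_matching_sequences words pattern =
      (List.range (words.length + 1 - pattern.length)).flatMap (pvWin words pattern) := by
  rw [find_matching_sequences]
  rw [PySem.List.foldl_append_if]
  rw [PySem.List.pyRange_one]
  simp only [PySem.List.len_eq, List.nil_append]
  rw [List.filter_map, List.map_map, filter_map_eq_flatMap]
  have hn : ((words.length : Int) - pattern.length + 1 - 0).toNat = words.length + 1 - pattern.length := by
    omega
  rw [hn]
  apply List.flatMap_congr
  intro k hk
  have hk' : k < words.length + 1 - pattern.length := List.mem_range.mp hk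
  have hsl : PySem.List.slice words (some ((0 : Int) + k)) (some ((0 : Int) + k + pattern.length)) =
      (words.drop k).take pattern.length := by
    have := PySem.List.slice_natCast_add (xs := words) (j := k) (n := pattern.length)
    simpa using this
  have hlen : ((words.drop k).take pattern.length).length = pattern.length := by
    simp; omega
  simp only [Function.comp, hsl, pvWin]
  rw [zip_all_len _ _ hlen]

lemma occ_getD (words : List String) (p : Int) :
    ((PySem.List.enumerate words 0).foldl
      (fun d q => d.modify (PySem.Str.len q.2) [] (· ++ [q.1])) PySem.Dict.empty).getD p []
      = pvOcc words p := by
  have h : (PySem.List.enumerate words 0).foldl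
      (fun d q => d.modify (PySem.Str.len q.2) [] (· ++ [q.1])) PySem.Dict.empty
      = ((PySem.List.enumerate words 0).map (fun q => (PySem.Str.len q.2, q.1))).foldl
          (fun d r => d.modify r.1 [] (· ++ [r.2])) PySem.Dict.empty := by
    rw [List.foldl_map]
  rw [h, PySem.Dict.getD_foldl_modify_append]
  simp [pvOcc, List.filter_map, Function.comp_def]

lemma occ_mem_natCast (words : List String) (p : Int) (t : Nat) :
    ((t : Int) ∈ pvOcc words p) ↔ ∃ h : t < words.length, PySem.Str.len words[t] = p := by
  unfold pvOcc
  simp only [List.mem_map, List.mem_filter, PySem.List.mem_enumerate_iff]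
  constructor
  · rintro ⟨q, ⟨⟨k, hk, rfl⟩, hlen⟩, hfst⟩
    simp only [zero_add] at hfst hlen
    have hkt : k = t := by exact_mod_cast hfst
    subst hkt
    exact ⟨hk, by simpa using hlen⟩
  · rintro ⟨ht, hlen⟩
    exact ⟨((t : Int), words[t]), ⟨⟨t, ht, by simp⟩, by simpa using hlen⟩, rfl⟩

lemma occ_nodup (words : List String) (p : Int) : (pvOcc words p).Nodup := by
  unfold pvOcc
  have h1 := PySem.List.pairwise_lt_enumerate words 0
  have h2 := h1.filter (fun q => PySem.Str.len q.2 == p)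
  have h3 : (((PySem.List.enumerate words 0).filter (fun q => PySem.Str.len q.2 == p)).map
      (·.1)).Pairwise (· < ·) := List.pairwise_map.mpr h2
  exact h3.imp ne_of_lt

lemma inner_len (M j : Int) (I : List Int) : ∀ (v : List Int),
    (I.foldl (pvStep M j) v).length = v.length := by
  induction I with
  | nil => intro v; rfl
  | cons i I' ih =>
    intro v
    rw [List.foldl_cons, ih]
    unfold pvStep
    split
    · rw [PySem.List.length_pySetD]
    · rfl

lemma inner_getD (M j : Int) (I : List Int) (hI : I.Nodup) (s : Nat) (hs : (s : Int) ≤ M) :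
    ∀ (v : List Int), v.length = (M + 1).toNat →
    (I.foldl (pvStep M j) v).getD s 0 = v.getD s 0 + (if ((s : Int) + j) ∈ I then 1 else 0) := by
  induction I with
  | nil => intro v _; simp
  | cons i I' ih =>
    intro v hv
    rcases List.nodup_cons.mp hI with ⟨hni, hI'⟩
    have hslt : s < v.length := by omega
    rw [List.foldl_cons]
    by_cases hc : 0 ≤ i - j ∧ i - j ≤ M
    · have htlt : (i - j).toNat < v.length := by omega
      have hstep : pvStep M j v i = v.set (i - j).toNat (v.getD (i - j).toNat 0 + 1) := by
        unfold pvStep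
        rw [if_pos hc, PySem.List.pySetD_of_nonneg _ _ hc.1,
          PySem.List.pyGetD_eq_getElem _ _ hc.1 (by omega), List.getD_eq_getElem _ _ htlt]
      rw [hstep, ih hI' _ (by rw [List.length_set]; exact hv)]
      by_cases hmem : (s : Int) + j = i
      · have hts : (i - j).toNat = s := by omega
        have hnot : ((s : Int) + j) ∉ I' := by rw [hmem]; exact hni
        rw [if_neg hnot, if_pos (by simp [hmem]), hts]
        have hset : (v.set s (v.getD s 0 + 1)).getD s 0 = v.getD s 0 + 1 := by
          have h1 : s < (v.set s (v.getD s 0 + 1)).length := by simpa using hslt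
          rw [List.getD_eq_getElem _ _ h1, List.getElem_set_self]
        rw [hset]
        ring
      · have hts : (i - j).toNat ≠ s := by omega
        have hset : (v.set (i - j).toNat (v.getD (i - j).toNat 0 + 1)).getD s 0 = v.getD s 0 := by
          rw [List.getD_eq_getElem _ _ (by simpa using hslt), List.getD_eq_getElem _ _ hslt,
            List.getElem_set_ne (by omega)]
        rw [hset]
        have hmm : (((s : Int) + j) ∈ i :: I') ↔ (((s : Int) + j) ∈ I') := by
          simp [hmem]
        by_cases h2 : ((s : Int) + j) ∈ I'
        · rw [if_pos h2, if_pos (hmm.mpr h2)]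
        · rw [if_neg h2, if_neg (fun hx => h2 (hmm.mp hx))]
    · have hstep : pvStep M j v i = v := by unfold pvStep; rw [if_neg hc]
      rw [hstep, ih hI' v hv]
      have hmem : (s : Int) + j ≠ i := by
        intro hx
        rcases not_and_or.mp hc with h | h <;> omega
      simp [hmem]

lemma outer_len (words : List String) (M : Int) (ps : List Int) : ∀ (j0 : Int) (v : List Int),
    ((PySem.List.enumerate ps j0).foldl
      (fun votes jp => (pvOcc words jp.2).foldl (pvStep M jp.1) votes) v).length = v.length := by
  induction ps with
  | nil => intro j0 v; rfl
  | cons p pt ih =>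
    intro j0 v
    rw [PySem.List.enumerate_cons, List.foldl_cons, ih, inner_len]

lemma outer_getD (words : List String) (M : Int) (ps : List Int) (s : Nat) (hs : (s : Int) ≤ M) :
    ∀ (j0 : Int) (v : List Int), v.length = (M + 1).toNat →
    ((PySem.List.enumerate ps j0).foldl
      (fun votes jp => (pvOcc words jp.2).foldl (pvStep M jp.1) votes) v).getD s 0
      = v.getD s 0 + ((PySem.List.enumerate ps j0).countP
          (fun jp => decide (((s : Int) + jp.1) ∈ pvOcc words jp.2)) : Int) := by
  induction ps with
  | nil => intro j0 v _; simp [PySem.List.enumerate]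
  | cons p pt ih =>
    intro j0 v hv
    rw [PySem.List.enumerate_cons, List.foldl_cons, List.countP_cons]
    rw [ih (j0 + 1) _ (by rw [inner_len]; exact hv)]
    rw [inner_getD M j0 (pvOcc words p) (occ_nodup words p) s hs v hv]
    by_cases hm : ((s : Int) + j0) ∈ pvOcc words p
    · simp [hm]; ring
    · simp [hm]

lemma b_unfold (words : List String) (pattern : List Int) :
    find_matching_sequences_alt words pattern =
      ((PySem.List.enumerate (pvVotes words pattern) 0).filter
          (fun sv => sv.2 == (pattern.length : Int))).map
        (fun sv => PySem.Str.join " "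
          (PySem.List.slice words (some sv.1) (some (sv.1 + (pattern.length : Int))))) := by
  rw [find_matching_sequences_alt]
  simp only [PySem.List.len_eq, occ_getD]
  rfl

lemma pvVotes_length (words : List String) (pattern : List Int) :
    (pvVotes words pattern).length = words.length + 1 - pattern.length := by
  unfold pvVotes
  rw [outer_len, List.length_replicate]
  unfold pvM
  omega

lemma pvVotes_getD (words : List String) (pattern : List Int) (s : Nat)
    (hs : (s : Int) ≤ pvM words pattern) :
    (pvVotes words pattern).getD s 0 = (pvCnt words pattern s : Int) := by
  unfold pvVotes pvCnt
  rw [outer_getD words (pvM words pattern) pattern s hs 0 _ (by rw [List.length_replicate])]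
  simp

lemma window_iff (words : List String) (pattern : List Int) (s : Nat)
    (hs : (s : Int) ≤ pvM words pattern) :
    (((words.drop s).take pattern.length).map PySem.Str.len = pattern)
      ↔ ∀ k, k < pattern.length →
          PySem.Str.len (words.getD (s + k) "") = pattern.getD k 0 := by
  have hn : pattern.length ≤ words.length - s := by unfold pvM at hs; omega
  have hlen : (((words.drop s).take pattern.length).map PySem.Str.len).length = pattern.length := by
    simp; omega
  have hget : ∀ k, (hk : k < pattern.length) →
      (((words.drop s).take pattern.length).map PySem.Str.len)[k]'(by rw [hlen]; exact hk) =
        PySem.Str.len (words.getD (s + k) "") := by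
    intro k hk
    rw [List.getElem_map, List.getElem_take, List.getElem_drop,
      List.getD_eq_getElem _ _ (by omega)]
  constructor
  · intro h k hk
    have h2 := List.getElem_of_eq h (i := k) (by rw [hlen]; exact hk)
    rw [hget k hk] at h2
    rw [List.getD_eq_getElem _ _ hk]
    exact h2
  · intro h
    apply List.ext_getElem (by rw [hlen])
    intro k hk1 hk2
    have hk3 : k < pattern.length := by rwa [hlen] at hk1
    rw [hget k hk3]
    exact (h k hk3).trans (List.getD_eq_getElem _ _ hk3)

lemma count_eq_iff (words : List String) (pattern : List Int) (s : Nat)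
    (hs : (s : Int) ≤ pvM words pattern) :
    (pvCnt words pattern s = pattern.length)
      ↔ (((words.drop s).take pattern.length).map PySem.Str.len = pattern) := by
  unfold pvCnt
  have h1 := List.countP_eq_length
    (l := PySem.List.enumerate pattern 0)
    (p := fun jp => decide (((s : Int) + jp.1) ∈ pvOcc words jp.2))
  rw [PySem.List.length_enumerate] at h1
  rw [h1, window_iff words pattern s hs]
  constructor
  · intro h k hk
    have hmem : ((0 : Int) + (k : Int), pattern[k]) ∈ PySem.List.enumerate pattern 0 :=
      (PySem.List.mem_enumerate_iff pattern 0 _).mpr ⟨k, hk, rfl⟩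
    have h2 := h _ hmem
    simp only [decide_eq_true_eq] at h2
    have hsk : ((s : Int) + ((0 : Int) + (k : Int))) = ((s + k : Nat) : Int) := by push_cast; ring
    rw [hsk, occ_mem_natCast] at h2
    rcases h2 with ⟨hw, hl⟩
    rw [List.getD_eq_getElem _ _ (by omega : s + k < words.length),
      List.getD_eq_getElem _ _ hk]
    exact hl
  · intro h jp hjp
    rcases (PySem.List.mem_enumerate_iff pattern 0 jp).mp hjp with ⟨k, hk, rfl⟩
    simp only [decide_eq_true_eq]
    have hsk : ((s : Int) + ((0 : Int) + (k : Int))) = ((s + k : Nat) : Int) := by push_cast; ring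
    rw [hsk, occ_mem_natCast]
    refine ⟨by unfold pvM at hs; omega, ?_⟩
    have := h k hk
    rw [List.getD_eq_getElem _ _ (show s + k < words.length by unfold pvM at hs; omega),
      List.getD_eq_getElem _ _ hk] at this
    exact this

lemma b_char (words : List String) (pattern : List Int) :
    find_matching_sequences_alt words pattern =
      (List.range (words.length + 1 - pattern.length)).flatMap (pvWin words pattern) := by
  rw [b_unfold]
  rw [PySem.List.enumerate_eq_map_pyRange (pvVotes words pattern) 0]
  rw [List.filter_map, List.map_map]
  have hlv : PySem.List.len (pvVotes words pattern)
      = ((words.length + 1 - pattern.length : Nat) : Int) := by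
    rw [PySem.List.len_eq, pvVotes_length]
  rw [hlv, PySem.List.pyRange_zero_nat]
  rw [List.filter_map, List.map_map, filter_map_eq_flatMap]
  apply List.flatMap_congr
  intro k hk
  have hkL : k < words.length + 1 - pattern.length := List.mem_range.mp hk
  have hsM : (k : Int) ≤ pvM words pattern := by unfold pvM; omega
  have hg : PySem.List.pyGetD (pvVotes words pattern) (k : Int) 0
      = (pvCnt words pattern k : Int) := by
    rw [PySem.List.pyGetD_natCast, pvVotes_getD words pattern k hsM]
  have hsl : PySem.List.slice words (some (k : Int)) (some ((k : Int) + (pattern.length : Int))) =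
      (words.drop k).take pattern.length :=
    PySem.List.slice_natCast_add (xs := words) (j := k) (n := pattern.length)
  have hcond : ((pvCnt words pattern k : Int) == (pattern.length : Int))
      = ((((words.drop k).take pattern.length).map PySem.Str.len) == pattern) := by
    rw [Bool.eq_iff_iff]
    simp only [beq_iff_eq, Nat.cast_inj]
    exact count_eq_iff words pattern k hsM
  simp only [Function.comp, hg, hsl, hcond, pvWin]

-- ===== VERDICT (by name: the statement is the Claim_ definition above) =====
theorem find_matching_sequences_spec : Claim_equal_find_matching_sequences := by
  intro words pattern _
  unfold Spec_find_matching_sequences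
  rw [a_char, b_char]
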